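-- pv_equiv track=rewrite | github.com/howard789/tianchi_happiness | common_kaggle/data_util.py | combine_list
-- ===== SOURCE A (Python) =====
-- def combine_list(src_features,delete_features,add_features):
--     # 整理 src_features
--     tmp=[]
--     for item in src_features:
--         try:
--             if(type(item)==str):
--                 tmp.append(item)
--             else:
--                 len(item)
--                 tmp+=item
--         except:
--             tmp.append(item)
--
--     # delete
--     tmp2=[]
--     for item in tmp:
--         if(item in delete_features and item not in add_features):
--             continue
--         else:
--             tmp2.append(item)
--
--     # add
--     for item in add_features:
--         if(item not in tmp2):
--             tmp2.append(item)
--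
--     # 删除重复的
--     final_list=[]
--     added=set()
--     for i in range(len(tmp2)):
--         v=tmp2[i]
--         if(v not in added):
--             final_list.append(v)
--             added.add(v)
--
--     return final_list
-- ===== SOURCE B (Python) =====
-- def combine_list(src_features, delete_features, add_features):
--     # drop = items scheduled for deletion that are not re-added
--     drop = set(delete_features) - set(add_features)
--     kept = [x for x in src_features if x not in drop]
--     # ordered dedup of kept features followed by the additions
--     return list(dict.fromkeys(kept + list(add_features)))
-- ===== Notes on version B (the rewrite author's own statement) =====
-- stated objective: simpler
-- what changed: A's four loops (flatten, filter with linear 'in' scans, add pass with a linear 'not in tmp2' scan, index-based dedup loop) are replaced by a set difference for the drop set, one filter comprehension, and a dict.fromkeys ordered dedup of kept+additions; the flatten loop disappears because on the claimed string-list domain it is the identity.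
import Mathlib
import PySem

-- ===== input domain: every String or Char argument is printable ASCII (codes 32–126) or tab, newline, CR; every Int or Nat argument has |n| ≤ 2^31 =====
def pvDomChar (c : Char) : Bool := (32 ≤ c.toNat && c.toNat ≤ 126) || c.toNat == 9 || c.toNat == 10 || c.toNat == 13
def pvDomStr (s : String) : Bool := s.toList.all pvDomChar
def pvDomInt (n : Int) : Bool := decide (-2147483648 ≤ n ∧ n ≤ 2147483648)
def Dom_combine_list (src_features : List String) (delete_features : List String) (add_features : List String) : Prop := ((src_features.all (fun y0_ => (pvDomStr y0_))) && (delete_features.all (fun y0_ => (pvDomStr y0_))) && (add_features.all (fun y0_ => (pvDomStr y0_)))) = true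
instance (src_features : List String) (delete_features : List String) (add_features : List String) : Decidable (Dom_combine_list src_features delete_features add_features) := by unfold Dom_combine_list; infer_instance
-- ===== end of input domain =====

-- B replaces A's four loops by a set difference, one filter and a dict.fromkeys ordered
-- dedup (simpler); on the claimed string-list inputs A's flatten loop is the identity.


-- ===== PORT A =====
-- (on List String inputs every item is a str, so the try/type-check branch always appends)
def combine_list (src_features : List String) (delete_features : List String) (add_features : List String) : List String :=
  -- 整理 src_features
  let tmp := src_features.foldl (fun acc item => acc ++ [item]) []
  -- delete
  let tmp2 := tmp.foldl (fun acc item =>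
      if delete_features.contains item && !(add_features.contains item) then acc
      else acc ++ [item]) []
  -- add
  let tmp2 := add_features.foldl (fun acc item =>
      if acc.contains item then acc else acc ++ [item]) tmp2
  -- 删除重复的
  let p := (PySem.List.pyRange 0 (tmp2.length : Int) 1).foldl
      (fun (st : List String × PySem.Set String) i =>
        let v := PySem.List.pyGetD tmp2 i ""
        if st.2.contains v then st else (st.1 ++ [v], PySem.Set.add st.2 v))
      ([], PySem.Set.empty)
  p.1

-- ===== PORT B =====
def combine_list_alt (src_features : List String) (delete_features : List String) (add_features : List String) : List String :=
  let drop : PySem.Set String :=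
    PySem.Set.diff (PySem.Set.ofList delete_features) (PySem.Set.ofList add_features)
  let kept := src_features.filter (fun x => !(drop.contains x))
  PySem.List.dedup (kept ++ add_features)

-- ===== PRECONDITION & SPEC =====
def Spec_combine_list (src_features : List String) (delete_features : List String) (add_features : List String) (out : List String) : Prop := out = combine_list_alt src_features delete_features add_features
instance (src_features : List String) (delete_features : List String) (add_features : List String) (out : List String) : Decidable (Spec_combine_list src_features delete_features add_features out) := by unfold Spec_combine_list; infer_instance

-- ===== CLAIM (what is proved, stated in full; the proofs are below) =====
def Claim_equal_combine_list : Prop := ∀ (src_features : List String) (delete_features : List String) (add_features : List String), Dom_combine_list src_features delete_features add_features → Spec_combine_list src_features delete_features add_features (combine_list src_features delete_features add_features)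

-- ===== LEMMAS AND PROOFS =====

-- A's dedup loop body (append v and record it unless already seen)
def dedupStep (st : List String × PySem.Set String) (v : String) : List String × PySem.Set String :=
  if st.2.contains v then st else (st.1 ++ [v], PySem.Set.add st.2 v)

-- A's dedup loop keeps its list and its seen set equal: starting from (s, s) it is foldl Set.add
theorem foldl_dedupStep_diag (L : List String) (s : PySem.Set String) :
    L.foldl dedupStep (s, s) = (L.foldl PySem.Set.add s, L.foldl PySem.Set.add s) := by
  induction L generalizing s with
  | nil => rfl
  | cons x xs ih =>
    by_cases h : x ∈ s
    · simp [dedupStep, h, ih]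
    · have hc : s.contains x = false := by
        simpa using (Bool.eq_false_iff.mpr (fun hc => h (List.contains_iff_mem.mp hc)))
      simp only [List.foldl_cons, dedupStep, hc, Bool.false_eq_true, if_false]
      rw [show (s ++ [x] : List String) = PySem.Set.add s x from (PySem.Set.add_of_not_mem h).symm]
      exact ih _

-- the 'append if missing' step feeds ofList the same set as always appending
theorem ofList_step (t : List String) (a : String) :
    PySem.Set.ofList (if t.contains a then t else t ++ [a])
      = PySem.Set.ofList (t ++ [a]) := by
  by_cases h : a ∈ t
  · have hc : t.contains a = true := List.contains_iff_mem.mpr h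
    rw [hc, if_pos rfl, PySem.Set.ofList_append_singleton,
        PySem.Set.add_of_mem ((PySem.Set.mem_ofList t a).mpr h)]
  · have hc : t.contains a = false := by
      simpa using (Bool.eq_false_iff.mpr (fun hc' => h (List.contains_iff_mem.mp hc')))
    rw [hc, if_neg (by simp)]

-- A's add pass feeds the final dedup the same set as plain concatenation
theorem ofList_addPass (adds t : List String) :
    PySem.Set.ofList (adds.foldl
        (fun acc item => if acc.contains item then acc else acc ++ [item]) t)
      = PySem.Set.ofList (t ++ adds) := by
  induction adds generalizing t with
  | nil => simp
  | cons a rest ih =>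
    rw [List.foldl_cons, ih, PySem.Set.ofList_append, ofList_step,
        PySem.Set.ofList_append_singleton, PySem.Set.ofList_append, PySem.Set.update_cons]

-- a skip-on-condition foldl is a foldl over the filtered list
theorem foldl_skip {α β : Type} (c : α → Bool) (g : β → α → β) (L : List α) (st : β) :
    L.foldl (fun st x => if c x then st else g st x) st
      = (L.filter (fun x => !c x)).foldl g st := by
  induction L generalizing st with
  | nil => rfl
  | cons x xs ih =>
    by_cases h : c x = true <;> simp [h, ih]

theorem combine_list_eq_alt (src delete add : List String) :
    combine_list src delete add = combine_list_alt src delete add := by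
  unfold combine_list combine_list_alt
  simp only [PySem.List.foldl_append_singleton, List.nil_append]
  -- A's index loop is a foldl of dedupStep over tmp2
  rw [show (fun (st : List String × PySem.Set String) (i : Int) =>
        let v := PySem.List.pyGetD
          (add.foldl (fun acc item => if acc.contains item then acc else acc ++ [item])
            (src.foldl (fun acc item =>
              if delete.contains item && !(add.contains item) then acc else acc ++ [item]) [])) i ""
        if st.2.contains v then st else (st.1 ++ [v], PySem.Set.add st.2 v))
      = (fun st i => dedupStep st (PySem.List.pyGetD
          (add.foldl (fun acc item => if acc.contains item then acc else acc ++ [item])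
            (src.foldl (fun acc item =>
              if delete.contains item && !(add.contains item) then acc else acc ++ [item]) [])) i ""))
      from rfl]
  rw [PySem.List.foldl_pyRange_zero_pyGetD' _ "" dedupStep _]
  -- started from ([], ∅) = (∅, ∅) the loop computes ofList tmp2
  rw [show (([], PySem.Set.empty) : List String × PySem.Set String)
        = ((PySem.Set.empty : PySem.Set String), (PySem.Set.empty : PySem.Set String)) from rfl]
  rw [foldl_dedupStep_diag]
  rw [show (PySem.Set.empty : PySem.Set String) = ([] : List String) from rfl]
  rw [← PySem.Set.ofList_eq_foldl]
  -- drop the add pass, turn the filter pass into List.filter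
  rw [ofList_addPass]
  rw [foldl_skip (fun item => delete.contains item && !(add.contains item))
      (fun acc item => acc ++ [item])]
  simp only [PySem.List.foldl_append_singleton, List.nil_append]
  -- B's dedup is ofList; B's drop-set test is A's boolean
  rw [PySem.List.dedup_eq_ofList]
  congr 1
  congr 1
  apply List.filter_congr
  intro x _
  by_cases hd : x ∈ delete <;> by_cases ha : x ∈ add <;>
    simp [PySem.Set.mem_diff, PySem.Set.mem_ofList, hd, ha]


-- ===== VERDICT (by name: the statement is the Claim_ definition above) =====
theorem combine_list_spec : Claim_equal_combine_list := by
  intro src delete add _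
  unfold Spec_combine_list
  exact combine_list_eq_alt src delete add
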